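-- pv_equiv track=rewrite | github.com/Kasimal/BlackJack | Tests/test_Hands.py | count_n_card_hands
-- ===== SOURCE A (Python) =====
-- from collections import Counter
--
-- def count_n_card_hands(n):
--     deck = [1, 2, 3, 4, 5, 6, 7, 8, 9] * 4 + [10] * 16
--     deck_count = Counter(deck)
--
--     def backtrack(remaining, current_sum, last_card):
--         if remaining == 0:
--             return 1 if current_sum <= 21 else 0
--         count = 0
--         for card in range(last_card, 11):
--             if deck_count[card] > 0 and current_sum + card <= 21:
--                 deck_count[card] -= 1
--                 count += backtrack(remaining - 1, current_sum + card, card)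
--                 deck_count[card] += 1
--         return count
--
--     return backtrack(n, 0, 1)
-- ===== SOURCE B (Python) =====
-- def _hand_table():
--     """table[u][t] = number of hands of u cards from the blackjack deck summing to t,
--     built by a DP over the ten ranks (choose how many copies of each rank)."""
--     table = [[1 if u == 0 and t == 0 else 0 for t in range(22)] for u in range(22)]
--     for value, copies in [(1, 4), (2, 4), (3, 4), (4, 4), (5, 4), (6, 4), (7, 4), (8, 4), (9, 4), (10, 16)]:
--         table = [[sum(table[u - k][t - k * value]
--                       for k in range(copies + 1) if k <= u and k * value <= t)
--                   for t in range(22)]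
--                  for u in range(22)]
--     return table
--
-- def count_n_card_hands(n):
--     if n < 0 or n > 21:
--         return 0
--     return sum(_hand_table()[n])
-- ===== Notes on version B (the rewrite author's own statement) =====
-- stated objective: faster
-- what changed: A's exponential backtracking over nondecreasing card sequences is replaced by a dynamic program over the ten ranks on a fixed 22x22 (cards used, hand sum) table, choosing the number of copies per rank; the answer is read off row n.
import Mathlib
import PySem

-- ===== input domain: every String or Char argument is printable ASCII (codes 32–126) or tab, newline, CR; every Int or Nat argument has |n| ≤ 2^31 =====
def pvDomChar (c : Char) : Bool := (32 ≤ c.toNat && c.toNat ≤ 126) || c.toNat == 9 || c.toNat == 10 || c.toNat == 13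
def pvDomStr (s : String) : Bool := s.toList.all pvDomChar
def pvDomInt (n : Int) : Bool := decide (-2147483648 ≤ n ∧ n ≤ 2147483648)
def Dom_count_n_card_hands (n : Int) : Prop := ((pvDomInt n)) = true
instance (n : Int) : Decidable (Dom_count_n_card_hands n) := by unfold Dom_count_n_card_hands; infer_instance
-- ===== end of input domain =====

-- B replaces A's backtracking over nondecreasing card sequences by a DP over the ten
-- ranks on a fixed (cards used, sum) table; objective: faster.

-- ===== PORT A =====
-- deck = [1..9]*4 + [10]*16
def pvDeck : List Int :=
  [1,2,3,4,5,6,7,8,9] ++ [1,2,3,4,5,6,7,8,9] ++ [1,2,3,4,5,6,7,8,9] ++ [1,2,3,4,5,6,7,8,9]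
    ++ List.replicate 16 (10 : Int)

-- backtrack(remaining, current_sum, last_card); the mutated Counter is threaded as `dc`
-- (decrement before the recursive call, restore after = pass the decremented dict down).
-- `fuel` only makes the recursion structural: from the initial call the depth is bounded
-- by 22, because every level adds a card ≥ 1 to current_sum under the ≤ 21 guard, so the
-- fuel-0 fallback is unreachable.
def pvBacktrack : Nat → PySem.Dict Int Int → Int → Int → Int → Int
  | 0, _, remaining, cs, _ => if remaining = 0 then (if cs ≤ 21 then 1 else 0) else 0
  | f + 1, dc, remaining, cs, lc =>
    if remaining = 0 then (if cs ≤ 21 then 1 else 0)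
    else
      (PySem.List.pyRange lc 11 1).foldl
        (fun count card =>
          if dc.getD card 0 > 0 ∧ cs + card ≤ 21 then
            count + pvBacktrack f (dc.modify card 0 (· - 1)) (remaining - 1) (cs + card) card
          else count) 0

def count_n_card_hands (n : Int) : Int :=
  pvBacktrack 22 (PySem.Dict.counter pvDeck) n 0 1

-- ===== PORT B =====
-- _hand_table(): table[u][t] = number of hands of u cards summing to t, built by a DP
-- over the ten ranks (how many copies of each rank); the table does not depend on n.
def pvHandTable : List (List Int) :=
  let table0 := (PySem.List.pyRange 0 22 1).map (fun u =>
    (PySem.List.pyRange 0 22 1).map (fun t => if u = 0 ∧ t = 0 then (1 : Int) else 0))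
  [((1:Int),(4:Int)),(2,4),(3,4),(4,4),(5,4),(6,4),(7,4),(8,4),(9,4),(10,16)].foldl
    (fun table vc =>
      (PySem.List.pyRange 0 22 1).map (fun u =>
        (PySem.List.pyRange 0 22 1).map (fun t =>
          (((PySem.List.pyRange 0 (vc.2 + 1) 1).filter (fun k => k ≤ u ∧ k * vc.1 ≤ t)).map
            (fun k => PySem.List.pyGetD (PySem.List.pyGetD table (u - k) []) (t - k * vc.1) 0)).sum)))
    table0

def count_n_card_hands_alt (n : Int) : Int :=
  if n < 0 ∨ n > 21 then 0
  else (PySem.List.pyGetD pvHandTable n []).sum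

-- ===== PRECONDITION & SPEC =====
def Spec_count_n_card_hands (n : Int) (out : Int) : Prop := out = count_n_card_hands_alt n
instance (n : Int) (out : Int) : Decidable (Spec_count_n_card_hands n out) := by unfold Spec_count_n_card_hands; infer_instance

-- ===== CLAIM (what is proved, stated in full; the proofs are below) =====
def Claim_equal_count_n_card_hands : Prop := ∀ (n : Int), Dom_count_n_card_hands n → Spec_count_n_card_hands n (count_n_card_hands n)

-- ===== LEMMAS AND PROOFS =====

-- the common value table: A's and B's results on n = 0..11 (0 for every larger n)
def pvVals : List Int := [1,10,55,179,336,434,426,319,175,68,15,1]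

-- A's backtracking returns 0 on a negative target count (remaining never reaches 0).
theorem pvBacktrack_neg (fuel : Nat) :
    ∀ (dc : PySem.Dict Int Int) (remaining cs lc : Int), remaining < 0 →
      pvBacktrack fuel dc remaining cs lc = 0 := by
  induction fuel with
  | zero =>
    intro dc remaining cs lc h
    simp only [pvBacktrack]
    rw [if_neg (by omega)]
  | succ f ih =>
    intro dc remaining cs lc h
    simp only [pvBacktrack]
    rw [if_neg (by omega)]
    have hcongr := PySem.List.foldl_congr_mem
      (l := PySem.List.pyRange lc 11 1) (init := (0 : Int))
      (f := fun count card =>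
        if dc.getD card 0 > 0 ∧ cs + card ≤ 21 then
          count + pvBacktrack f (dc.modify card 0 (· - 1)) (remaining - 1) (cs + card) card
        else count)
      (g := fun count _ => count)
      (by
        intro acc card _
        dsimp only
        by_cases hg : dc.getD card 0 > 0 ∧ cs + card ≤ 21
        · rw [if_pos hg, ih _ _ _ _ (by omega), add_zero]
        · rw [if_neg hg])
    rw [hcongr]
    exact List.foldl_fixed _

-- "r cards of value ≥ lc, within availability dc, with total value ≤ b, can be picked":
-- the reachability predicate of A's recursion.
def pvFeasible : PySem.Dict Int Int → Int → Nat → Int → Bool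
  | _, _, 0, _ => true
  | dc, lc, r + 1, b =>
    (PySem.List.pyRange lc 11 1).any (fun card =>
      decide (dc.getD card 0 > 0) && decide (card ≤ b) &&
        pvFeasible (dc.modify card 0 (· - 1)) card r (b - card))

theorem pvFeasible_mono_r (r : Nat) :
    ∀ (dc : PySem.Dict Int Int) (lc b : Int),
      pvFeasible dc lc (r + 1) b = true → pvFeasible dc lc r b = true := by
  induction r with
  | zero => intro dc lc b _; rfl
  | succ r ih =>
    intro dc lc b h
    simp only [pvFeasible, List.any_eq_true] at h ⊢
    obtain ⟨card, hmem, hcard⟩ := h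
    simp only [Bool.and_eq_true, decide_eq_true_eq] at hcard ⊢
    exact ⟨card, hmem, hcard.1, ih _ _ _ hcard.2⟩

theorem pvFeasible_mono_le {r r' : Nat} (h : r ≤ r') :
    ∀ (dc : PySem.Dict Int Int) (lc b : Int),
      pvFeasible dc lc r' b = true → pvFeasible dc lc r b = true := by
  obtain ⟨k, rfl⟩ := Nat.exists_eq_add_of_le h
  induction k with
  | zero => intro dc lc b h'; exact h'
  | succ k ih =>
    intro dc lc b h'
    exact ih (by omega) dc lc b (pvFeasible_mono_r _ _ _ _ h')

-- If r cards cannot be picked at all under the budget, A's backtracking returns 0.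
theorem pvBacktrack_of_infeasible (fuel : Nat) :
    ∀ (dc : PySem.Dict Int Int) (r : Nat) (cs lc : Int),
      pvFeasible dc lc r (21 - cs) = false →
      pvBacktrack fuel dc (r : Int) cs lc = 0 := by
  induction fuel with
  | zero =>
    intro dc r cs lc hinf
    match r with
    | 0 => exact absurd hinf (by simp [pvFeasible])
    | r + 1 =>
      simp only [pvBacktrack]
      rw [if_neg (by omega)]
  | succ f ih =>
    intro dc r cs lc hinf
    match r with
    | 0 => exact absurd hinf (by simp [pvFeasible])
    | r + 1 =>
      simp only [pvBacktrack]
      rw [if_neg (by omega)]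
      have hcongr := PySem.List.foldl_congr_mem
        (l := PySem.List.pyRange lc 11 1) (init := (0 : Int))
        (f := fun count card =>
          if dc.getD card 0 > 0 ∧ cs + card ≤ 21 then
            count + pvBacktrack f (dc.modify card 0 (· - 1)) ((((r + 1 : Nat)) : Int) - 1) (cs + card) card
          else count)
        (g := fun count _ => count)
        (by
          intro acc card hmem
          dsimp only
          by_cases hg : dc.getD card 0 > 0 ∧ cs + card ≤ 21
          · rw [if_pos hg]
            have hsub : pvFeasible (dc.modify card 0 (· - 1)) card r (21 - (cs + card)) = false := by
              cases hx : pvFeasible (dc.modify card 0 (· - 1)) card r (21 - (cs + card)) with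
              | false => rfl
              | true =>
                exfalso
                have hall : pvFeasible dc lc (r + 1) (21 - cs) = true := by
                  simp only [pvFeasible, List.any_eq_true]
                  refine ⟨card, hmem, ?_⟩
                  simp only [Bool.and_eq_true, decide_eq_true_eq]
                  refine ⟨⟨hg.1, by omega⟩, ?_⟩
                  rw [show (21 : Int) - cs - card = 21 - (cs + card) by ring]
                  exact hx
                rw [hall] at hinf; cases hinf
            rw [show (((r + 1 : Nat) : Int) - 1) = (r : Int) by push_cast; ring,
              ih _ _ _ _ hsub, add_zero]
          · rw [if_neg hg])
      rw [hcongr]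
      exact List.foldl_fixed _

-- From the full deck, 12 cards (all values ≥ 1) can never total ≤ 21
set_option maxRecDepth 1000000 in
set_option maxHeartbeats 16000000 in
theorem pvInfeasible12 : pvFeasible (PySem.Dict.counter pvDeck) 1 12 21 = false := by decide

-- A's values on 0..11, one shared evaluation
set_option maxRecDepth 1000000 in
set_option maxHeartbeats 16000000 in
theorem pvAVals :
    (List.range 12).all (fun k => count_n_card_hands (k : Int) == pvVals.getD k 0) = true := by
  decide

-- B's values on 0..21, one shared evaluation (pvVals.getD k 0 = 0 for k ≥ 12)
set_option maxRecDepth 1000000 in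
set_option maxHeartbeats 16000000 in
theorem pvBVals :
    (List.range 22).all (fun k => count_n_card_hands_alt (k : Int) == pvVals.getD k 0) = true := by
  decide

theorem pvA_zero_of_ge_12 (n : Int) (h : 12 ≤ n) : count_n_card_hands n = 0 := by
  have h12 : (12 : Nat) ≤ n.toNat := by omega
  have hinf : pvFeasible (PySem.Dict.counter pvDeck) 1 n.toNat 21 = false := by
    cases hx : pvFeasible (PySem.Dict.counter pvDeck) 1 n.toNat 21 with
    | false => rfl
    | true =>
      exfalso
      have h0 := pvFeasible_mono_le h12 _ _ _ hx
      have h1 := pvInfeasible12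
      rw [h0] at h1
      cases h1
  have hn : ((n.toNat : Nat) : Int) = n := Int.toNat_of_nonneg (by omega)
  unfold count_n_card_hands
  rw [← hn]
  exact pvBacktrack_of_infeasible 22 _ n.toNat 0 1 (by simpa using hinf)

-- ===== VERDICT (by name: the statement is the Claim_ definition above) =====
theorem count_n_card_hands_spec : Claim_equal_count_n_card_hands := by
  intro n _
  unfold Spec_count_n_card_hands
  by_cases hneg : n < 0
  · unfold count_n_card_hands
    rw [pvBacktrack_neg 22 _ n 0 1 hneg]
    unfold count_n_card_hands_alt
    rw [if_pos (Or.inl hneg)]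
  · by_cases hbig : 21 < n
    · rw [pvA_zero_of_ge_12 n (by omega)]
      unfold count_n_card_hands_alt
      rw [if_pos (Or.inr hbig)]
    · -- 0 ≤ n ≤ 21
      have hn : ((n.toNat : Nat) : Int) = n := Int.toNat_of_nonneg (by omega)
      have hkB : n.toNat ∈ List.range 22 := List.mem_range.mpr (by omega)
      have hB := eq_of_beq (List.all_eq_true.mp pvBVals _ hkB)
      rw [hn] at hB
      by_cases hsmall : n ≤ 11
      · have hkA : n.toNat ∈ List.range 12 := List.mem_range.mpr (by omega)
        have hA := eq_of_beq (List.all_eq_true.mp pvAVals _ hkA)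
        rw [hn] at hA
        exact hA.trans hB.symm
      · rw [pvA_zero_of_ge_12 n (by omega), hB]
        have hlen : pvVals.length ≤ n.toNat := by
          simp only [pvVals, List.length_cons, List.length_nil]
          omega
        rw [List.getD_eq_default _ _ hlen]
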